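-- pv_equiv track=rewrite | github.com/zhengxiaocai/baseex | practice/ex024.py | solve
-- ===== SOURCE A (Python) =====
-- def solve(eq):
--     """ 初版，在str逆序之后，再把数字倒转过来 """
--     res, curr = '', ''
--     for i in eq[::-1]:
--         if i not in '+-*/':
--             curr += i
--         else:
--             res += curr[::-1]
--             res += i
--             curr = ''
--     return res + curr[::-1]
-- ===== SOURCE B (Python) =====
-- def solve(eq):
--     """Backward index scan: emit operand slices and operators in final order; no reversal anywhere."""
--     out = []
--     j = len(eq)
--     for i in range(len(eq) - 1, -1, -1):
--         if eq[i] in '+-*/':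
--             out.append(eq[i + 1:j])
--             out.append(eq[i])
--             j = i
--     out.append(eq[:j])
--     return ''.join(out)
-- ===== Notes on version B (the rewrite author's own statement) =====
-- stated objective: alternative
-- what changed: B scans indices backward once, emitting whole operand slices and operators directly in final order and joining them, instead of A's reverse-the-whole-string char-accumulation with a per-operand second reversal; B performs no reversal at all.
import Mathlib
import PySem

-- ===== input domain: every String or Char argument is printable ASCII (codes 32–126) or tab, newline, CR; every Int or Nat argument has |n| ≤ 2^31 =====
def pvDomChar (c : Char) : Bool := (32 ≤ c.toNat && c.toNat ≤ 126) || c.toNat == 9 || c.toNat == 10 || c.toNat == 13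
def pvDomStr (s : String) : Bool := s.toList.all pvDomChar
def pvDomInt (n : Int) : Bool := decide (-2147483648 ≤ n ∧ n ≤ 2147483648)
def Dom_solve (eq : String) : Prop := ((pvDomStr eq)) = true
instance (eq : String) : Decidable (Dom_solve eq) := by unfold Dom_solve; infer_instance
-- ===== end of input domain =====

-- B scans indices backward once, emitting whole operand slices and operators in final order (no reversal at all), instead of A's reverse-then-re-reverse char accumulation; same value, same cost (objective: alternative).

-- ===== PORT A =====
-- strings are ported through List Char; eq[::-1] is the reversed character list
def stepA (s : List Char × List Char) (i : Char) : List Char × List Char :=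
  if i ∈ ['+', '-', '*', '/'] then (s.1 ++ s.2.reverse ++ [i], [])
  else (s.1, s.2 ++ [i])

def solve (eq : String) : String :=
  let p := eq.toList.reverse.foldl stepA ([], [])
  String.mk (p.1 ++ p.2.reverse)

-- ===== PORT B =====
-- for i in range(len(eq)-1, -1, -1): i is always a valid index, so eq[i] is pyGetD (exact here);
-- eq[i+1:j] and eq[:j] are PySem.List.slice; ''.join(out) is flatten
def stepB (xs : List Char) (s : List (List Char) × Int) (i : Int) : List (List Char) × Int :=
  if PySem.List.pyGetD xs i ' ' ∈ ['+', '-', '*', '/'] then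
    (s.1 ++ [PySem.List.slice xs (some (i + 1)) (some s.2), [PySem.List.pyGetD xs i ' ']], i)
  else s

def solve_alt (eq : String) : String :=
  let xs := eq.toList
  let q := (PySem.List.pyRange ((xs.length : Int) - 1) (-1) (-1)).foldl (stepB xs) ([], (xs.length : Int))
  String.mk ((q.1 ++ [PySem.List.slice xs none (some q.2)]).flatten)

-- ===== PRECONDITION & SPEC =====
def Spec_solve (eq : String) (out : String) : Prop := out = solve_alt eq
instance (eq : String) (out : String) : Decidable (Spec_solve eq out) := by unfold Spec_solve; infer_instance

-- ===== CLAIM (what is proved, stated in full; the proofs are below) =====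
def Claim_equal_solve : Prop := ∀ (eq : String), Dom_solve eq → Spec_solve eq (solve eq)

-- ===== LEMMAS AND PROOFS =====

-- Invariant: after both passes have handled indices ≥ m (current B segment boundary j),
-- A's res is the flatten of B's emitted tokens and A's curr is the reverse of the pending segment xs[m:j].
theorem main_lemma (xs : List Char) : ∀ (m j : Nat), m ≤ j → j ≤ xs.length →
    (∀ c ∈ (xs.take j).drop m, c ∉ (['+', '-', '*', '/'] : List Char)) →
    ∀ (out : List (List Char)),
    (let p := (xs.take m).reverse.foldl stepA (out.flatten, ((xs.take j).drop m).reverse)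
     p.1 ++ p.2.reverse)
    = (let q := (PySem.List.pyRange ((m : Int) - 1) (-1) (-1)).foldl (stepB xs) (out, (j : Int))
       (q.1 ++ [PySem.List.slice xs none (some (q.2))]).flatten) := by
  intro m
  induction m with
  | zero =>
    intro j _ hj hseg out
    simp only [List.take_zero, List.reverse_nil, List.foldl_nil, Nat.cast_zero,
      PySem.List.pyRange_neg_one_eq_nil (by omega : (0:Int) - 1 ≤ -1)]
    simp [PySem.List.slice_to_natCast, List.flatten_append]
  | succ m ih =>
    intro j hmj hj hseg out
    have hm : m < xs.length := by omega
    have htake : xs.take (m + 1) = xs.take m ++ [xs[m]] := List.take_succ_eq_append_getElem hm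
    have hrange : PySem.List.pyRange ((↑(m + 1) : Int) - 1) (-1) (-1)
        = (m : Int) :: PySem.List.pyRange ((m : Int) - 1) (-1) (-1) := by
      have := PySem.List.pyRange_neg_one_cons (a := (m : Int)) (b := -1) (by omega)
      simpa using this
    have hget : PySem.List.pyGetD xs (m : Int) ' ' = xs[m] := by
      rw [PySem.List.pyGetD_natCast]
      exact List.getD_eq_getElem xs ' ' hm
    have hdropm : (xs.take j).drop m = xs[m] :: (xs.take j).drop (m + 1) := by
      have h1 : m < (xs.take j).length := by simp; omega
      rw [List.drop_eq_getElem_cons h1]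
      congr 1
      exact List.getElem_take
    rw [htake, hrange]
    simp only [List.reverse_append, List.reverse_cons, List.reverse_nil, List.nil_append,
      List.cons_append, List.foldl_cons]
    by_cases hop : xs[m] ∈ (['+', '-', '*', '/'] : List Char)
    · -- operator at index m
      have hsliceB : PySem.List.slice xs (some ((m : Int) + 1)) (some (j : Int))
          = (xs.take j).drop (m + 1) := by
        have : ((m : Int) + 1) = ((m + 1 : Nat) : Int) := by push_cast; ring
        rw [this, PySem.List.slice_natCast]
        rw [List.drop_take]
      have hstepA : stepA (out.flatten, ((xs.take j).drop (m + 1)).reverse) xs[m]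
          = ((out ++ [PySem.List.slice xs (some ((m : Int) + 1)) (some (j : Int)), [xs[m]]]).flatten, []) := by
        simp [stepA, hop, hsliceB, List.flatten_append]
      have hstepB : stepB xs (out, (j : Int)) (m : Int)
          = (out ++ [PySem.List.slice xs (some ((m : Int) + 1)) (some (j : Int)), [xs[m]]], (m : Int)) := by
        simp [stepB, hget, hop]
      rw [hstepA, hstepB]
      have := ih m (le_refl m) (by omega) (by simp) (out ++ [PySem.List.slice xs (some ((m : Int) + 1)) (some (j : Int)), [xs[m]]])
      simpa using this
    · -- ordinary character at index m
      have hstepA : stepA (out.flatten, ((xs.take j).drop (m + 1)).reverse) xs[m]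
          = (out.flatten, ((xs.take j).drop m).reverse) := by
        simp [stepA, hop, hdropm]
      have hstepB : stepB xs (out, (j : Int)) (m : Int) = (out, (j : Int)) := by
        simp [stepB, hget, hop]
      rw [hstepA, hstepB]
      refine ih j (by omega) hj ?_ out
      intro c hc
      rw [hdropm] at hc
      rcases List.mem_cons.mp hc with h | h
      · rwa [h]
      · exact hseg c h

-- ===== VERDICT (by name: the statement is the Claim_ definition above) =====
theorem solve_spec : Claim_equal_solve := by
  intro eq _
  show solve eq = solve_alt eq
  simp only [solve, solve_alt]
  have h := main_lemma eq.toList eq.toList.length eq.toList.length (le_refl _) (le_refl _)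
    (by simp) []
  simp only [List.take_length, List.drop_length, List.reverse_nil, List.flatten_nil] at h
  rw [h]
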